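-- pv_equiv track=rewrite | github.com/pynucastro/pynucastro | pynucastro/library/tabular/checktables.py | nuc_A_first
-- ===== SOURCE A (Python) =====
-- def nuc_A_first(nuc_A_last):
--     snuc = ""
--     for c in nuc_A_last:
--         if c.isdigit():
--             snuc += c
--     for c in nuc_A_last:
--         if not c.isdigit():
--             snuc += c
--     return snuc
-- ===== SOURCE B (Python) =====
-- def nuc_A_first(nuc_A_last):
--     return ''.join(sorted(nuc_A_last, key=lambda c: not c.isdigit()))
-- ===== Notes on version B (the rewrite author's own statement) =====
-- stated objective: idiomatic
-- what changed: Replaces the two filtering concatenation passes with a single stable sort keyed on non-digit-ness (digits sort first, each group keeping its original order).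
import Mathlib
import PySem

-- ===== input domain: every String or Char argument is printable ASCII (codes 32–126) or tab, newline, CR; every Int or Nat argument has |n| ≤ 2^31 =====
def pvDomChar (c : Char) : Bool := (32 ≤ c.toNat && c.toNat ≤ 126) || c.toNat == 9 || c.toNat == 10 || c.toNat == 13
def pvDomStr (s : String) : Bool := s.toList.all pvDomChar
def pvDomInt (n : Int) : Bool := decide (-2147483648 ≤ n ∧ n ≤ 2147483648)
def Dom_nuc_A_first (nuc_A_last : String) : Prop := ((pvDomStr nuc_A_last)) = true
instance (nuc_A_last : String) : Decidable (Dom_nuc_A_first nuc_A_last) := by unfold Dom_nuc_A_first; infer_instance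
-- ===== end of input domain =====

-- B replaces A's two filtering passes by one stable sort keyed on non-digit-ness (idiomatic; not faster).

-- ===== PORT A =====
-- snuc = ""; for c: if c.isdigit(): snuc += c; for c: if not c.isdigit(): snuc += c
def nuc_A_first (nuc_A_last : String) : String :=
  let snuc1 : List Char :=
    nuc_A_last.toList.foldl (fun snuc c => if PySem.Chars.isdigit c then snuc ++ [c] else snuc) []
  let snuc2 : List Char :=
    nuc_A_last.toList.foldl (fun snuc c => if !PySem.Chars.isdigit c then snuc ++ [c] else snuc) snuc1
  String.mk snuc2

-- ===== PORT B =====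
-- ''.join(sorted(nuc_A_last, key=lambda c: not c.isdigit()))
def nuc_A_first_alt (nuc_A_last : String) : String :=
  String.mk (PySem.List.sorted nuc_A_last.toList (fun c => !PySem.Chars.isdigit c) false)

-- ===== PRECONDITION & SPEC =====
def Spec_nuc_A_first (nuc_A_last : String) (out : String) : Prop := out = nuc_A_first_alt nuc_A_last
instance (nuc_A_last : String) (out : String) : Decidable (Spec_nuc_A_first nuc_A_last out) := by unfold Spec_nuc_A_first; infer_instance

-- ===== CLAIM (what is proved, stated in full; the proofs are below) =====
def Claim_equal_nuc_A_first : Prop := ∀ (nuc_A_last : String), Dom_nuc_A_first nuc_A_last → Spec_nuc_A_first nuc_A_last (nuc_A_first nuc_A_last)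

-- ===== LEMMAS AND PROOFS =====

-- inserting past a prefix it does not go before
theorem insertBy_append_left {α : Type} (bf : α → α → Bool) (x : α) (F T : List α)
    (hF : ∀ y ∈ F, bf x y = false) :
    PySem.List.insertBy bf x (F ++ T) = F ++ PySem.List.insertBy bf x T := by
  induction F with
  | nil => simp
  | cons y ys ih =>
      have hy : bf x y = false := hF y (by simp)
      simp [PySem.List.insertBy, hy, ih (fun z hz => hF z (by simp [hz]))]

-- inserting in front of a list it goes entirely before
theorem insertBy_of_forall_before {α : Type} (bf : α → α → Bool) (x : α) (T : List α)
    (hT : ∀ y ∈ T, bf x y = true) :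
    PySem.List.insertBy bf x T = x :: T := by
  cases T with
  | nil => simp [PySem.List.insertBy]
  | cons t ts => simp [PySem.List.insertBy, hT t (by simp)]

-- stable insertion sort with a boolean key partitions: falses (in order) then trues (in order)
theorem foldl_insertBy_bool_partition {α : Type} (key : α → Bool) (xs : List α) :
    ∀ (F T : List α), (∀ y ∈ F, key y = false) → (∀ y ∈ T, key y = true) →
      xs.foldl (fun acc x => PySem.List.insertBy (fun a b => decide (key a < key b)) x acc) (F ++ T)
        = (F ++ xs.filter (fun c => key c = false)) ++ (T ++ xs.filter (fun c => key c = true)) := by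
  induction xs with
  | nil => intro F T _ _; simp
  | cons x xs ih =>
      intro F T hF hT
      by_cases hx : key x = true
      · have hstep : PySem.List.insertBy (fun a b => decide (key a < key b)) x (F ++ T)
            = F ++ (T ++ [x]) := by
          rw [← List.append_assoc]
          exact PySem.List.insertBy_of_forall_not_before _ x (F ++ T)
            (by intro y hy; rcases List.mem_append.1 hy with h | h
                · simp [hx, hF y h]
                · simp [hx, hT y h])
        have := ih F (T ++ [x]) hF
          (by intro y hy; rcases List.mem_append.1 hy with h | h
              · exact hT y h
              · simp at h; simp [h, hx])
        simp only [List.foldl_cons, hstep]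
        rw [this]
        simp [hx]
      · have hx' : key x = false := by simpa using hx
        have hstep : PySem.List.insertBy (fun a b => decide (key a < key b)) x (F ++ T)
            = (F ++ [x]) ++ T := by
          rw [insertBy_append_left _ x F T
            (by intro y hy; simp [hx', hF y hy])]
          rw [insertBy_of_forall_before _ x T
            (by intro y hy; simp [hx', hT y hy, Bool.lt_iff])]
          simp
        have := ih (F ++ [x]) T
          (by intro y hy; rcases List.mem_append.1 hy with h | h
              · exact hF y h
              · simp at h; simp [h, hx'])
          hT
        simp only [List.foldl_cons, hstep]
        rw [this]
        simp [hx']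

theorem sorted_bool_key_eq (xs : List Char) :
    PySem.List.sorted xs (fun c => !PySem.Chars.isdigit c) false
      = xs.filter (fun c => PySem.Chars.isdigit c) ++ xs.filter (fun c => !PySem.Chars.isdigit c) := by
  rw [PySem.List.sorted_eq_foldl_insertBy]
  have := foldl_insertBy_bool_partition (fun c => !PySem.Chars.isdigit c) xs [] []
    (by simp) (by simp)
  simp only [List.nil_append, List.append_nil] at this
  rw [this]
  congr 1
  · apply List.filter_congr; intro c _; simp
  · apply List.filter_congr; intro c _; simp

theorem nuc_A_first_eq_parts (s : String) :
    nuc_A_first s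
      = String.mk (s.toList.filter (fun c => PySem.Chars.isdigit c)
          ++ s.toList.filter (fun c => !PySem.Chars.isdigit c)) := by
  unfold nuc_A_first
  simp only [PySem.List.foldl_append_if_eq_filter, List.nil_append]

-- ===== VERDICT (by name: the statement is the Claim_ definition above) =====
theorem nuc_A_first_spec : Claim_equal_nuc_A_first := by
  intro s _
  unfold Spec_nuc_A_first nuc_A_first_alt
  rw [nuc_A_first_eq_parts, sorted_bool_key_eq]
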